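-- pv_equiv track=rewrite | github.com/joshua-robinson/csci662-project | strategic_span_selection.py | insert_sentinel_tokens
-- ===== SOURCE A (Python) =====
-- from collections import deque
--
-- def find_word_level_indexes(words, phrases):
--     idx = 0
--     phrase_locs = []
--
--     for phrase in phrases:  # Use a set to handle duplicate phrases
--         # Tokenize the phrase into words
--         phrase_words = phrase.split()
--         phrase_len = len(phrase_words)
--
--         # Find the starting word index of the phrase
--         for i in range(idx, len(words) - phrase_len + 1):
--             if words[i : i + phrase_len] == phrase_words:
--                 phrase_locs.append((i, i + phrase_len - 1))
--                 idx = i + phrase_len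
--                 break
--
--     return phrase_locs
--
-- def remove_back_to_back_cr_cl(tokens, cr_token, cl_token):
--     """
--     Removes `cr_token` followed immediately by `cl_token` from the token list.
--
--     Args:
--         tokens (list): The list of tokens.
--         cr_token (str): The token indicating the end of a masked phrase.
--         cl_token (str): The token indicating the start of a masked phrase.
--
--     Returns:
--         list: A new list of tokens with consecutive `cr_token` and `cl_token` removed.
--     """
--     result = []
--     skip_next = False
--
--     for i in range(len(tokens) - 1):
--         if skip_next:
--             skip_next = False
--             continue
--         if tokens[i] == cr_token and tokens[i + 1] == cl_token:
--             skip_next = True  # Skip the next token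
--         else:
--             result.append(tokens[i])
--
--     # Add the last token if it wasn't skipped
--     if not skip_next:
--         result.append(tokens[-1])
--
--     return result
--
-- def insert_sentinel_tokens(input_text, masked_phrases, cl_token, cr_token):
--     # Normalize masked phrases: strip extra spaces and remove '�', if any
--     masked_phrases = [
--         phrase.replace("�", "").strip() for phrase in masked_phrases if phrase.strip()
--     ]
--     masked_phrases = [
--         phrase for phrase in masked_phrases if phrase
--     ]  # remove empty strings
--
--     # get the words
--     words = input_text.split()
--
--     # find indices where unique masked phrases occur, list of tuples
--     masked_phrase_indexes = find_word_level_indexes(words, masked_phrases)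
--
--     # for every tuple in masked_phrase_indexes, insert cl_token and cr_token
--     phrase_idx_q = deque(masked_phrase_indexes)
--     final_tokens = []
--
--     # ensure that there are phrases to mask
--     if not phrase_idx_q:
--         return input_text
--
--     curr_mask_start, curr_mask_end = phrase_idx_q.popleft()
--
--     for idx, word in enumerate(words):
--
--         if idx == curr_mask_start:
--             final_tokens.append(cl_token)
--
--         final_tokens.append(word)
--
--         if idx == curr_mask_end:
--             final_tokens.append(cr_token)
--             if phrase_idx_q:
--                 curr_mask_start, curr_mask_end = phrase_idx_q.popleft()
--
--     # combine spans that meet at ends, i.e. remove cr_token, cl_token if they are next to each other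
--     combined_tokens = remove_back_to_back_cr_cl(final_tokens, cr_token, cl_token)
--
--     return " ".join(combined_tokens)
-- ===== SOURCE B (Python) =====
-- def insert_sentinel_tokens(input_text, masked_phrases, cl_token, cr_token):
--     # normalize phrases exactly like the original
--     phrases = [p.replace("\ufffd", "").strip() for p in masked_phrases if p.strip()]
--     phrases = [p for p in phrases if p]
--
--     words = input_text.split()
--
--     # sequentially find each phrase's word-level span (half-open), scanning from
--     # the running index; elementwise compare with early exit (no slice copies)
--     spans = []
--     idx = 0
--     for phrase in phrases:
--         pws = phrase.split()
--         n = len(pws)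
--         limit = len(words) - n
--         i = idx
--         while i <= limit:
--             j = 0
--             while j < n and words[i + j] == pws[j]:
--                 j += 1
--             if j == n:
--                 spans.append((i, i + n))
--                 idx = i + n
--                 break
--             i += 1
--
--     if not spans:
--         return input_text
--
--     # merge spans that touch (end of one == start of next)
--     merged = [spans[0]]
--     for s, e in spans[1:]:
--         ls, le = merged[-1]
--         if le == s:
--             merged[-1] = (ls, e)
--         else:
--             merged.append((s, e))
--
--     # single pass: emit words with sentinel tokens around each merged span
--     out = []
--     prev = 0
--     for s, e in merged:
--         out.extend(words[prev:s])
--         out.append(cl_token)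
--         out.extend(words[s:e])
--         out.append(cr_token)
--         prev = e
--     out.extend(words[prev:])
--     return " ".join(out)
-- ===== Notes on version B (the rewrite author's own statement) =====
-- stated objective: alternative
-- what changed: B replaces A's token-stream construction plus post-hoc removal of back-to-back cr/cl sentinel pairs by computing half-open word spans, merging touching spans once, and emitting the output in a single pass over merged spans, with an early-exit elementwise phrase comparison instead of repeated slice copies.
-- outside the precondition, e.g. on insert_sentinel_tokens('x B A', ['x'], 'A', 'B'): A returns 'A x B', B returns 'A x B B A'
import Mathlib
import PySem

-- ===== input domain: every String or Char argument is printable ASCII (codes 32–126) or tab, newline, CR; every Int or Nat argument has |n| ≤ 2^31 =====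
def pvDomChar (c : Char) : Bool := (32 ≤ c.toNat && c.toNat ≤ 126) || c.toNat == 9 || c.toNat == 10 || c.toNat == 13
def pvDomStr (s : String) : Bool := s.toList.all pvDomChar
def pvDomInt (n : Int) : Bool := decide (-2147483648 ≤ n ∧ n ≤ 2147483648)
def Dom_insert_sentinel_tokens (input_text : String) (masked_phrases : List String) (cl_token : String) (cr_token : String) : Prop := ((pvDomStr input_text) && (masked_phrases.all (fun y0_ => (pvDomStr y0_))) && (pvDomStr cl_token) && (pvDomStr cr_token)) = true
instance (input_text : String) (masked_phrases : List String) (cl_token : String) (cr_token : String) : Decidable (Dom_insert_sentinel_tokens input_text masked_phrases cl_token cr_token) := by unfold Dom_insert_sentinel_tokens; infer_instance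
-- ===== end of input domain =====

-- B replaces A's token-stream-then-cleanup by span merging and a single emission pass (objective: alternative).

-- ===== PORT A =====

-- shared by both ports (both Pythons normalize the phrase list with the same two comprehensions):
-- [phrase.replace("�","").strip() for phrase in masked_phrases if phrase.strip()], then drop falsy (empty) results
def pvNormalize (masked_phrases : List String) : List String :=
  ((masked_phrases.filter (fun p => PySem.Str.strip p ≠ "")).map
      (fun p => PySem.Str.strip (PySem.Str.replace p "\uFFFD" ""))).filter (fun p => p ≠ "")

-- for i in range(idx, len(words)-phrase_len+1): if words[i:i+phrase_len]==phrase_words: return i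
-- (the slice words[i:i+plen] with Nat bounds is (words.drop i).take plen, PySem.List.slice_natCast_add;
--  the Nat bound words.length+1-plen equals Python's max(0, len(words)-plen+1), the same index set)
def pvFindLoopA (words pws : List String) (i stop : Nat) : Option Nat :=
  if _h : i < stop then
    if (words.drop i).take pws.length = pws then some i
    else pvFindLoopA words pws (i + 1) stop
  else none
termination_by stop - i

-- one iteration of the loop of find_word_level_indexes (state: running idx, phrase_locs)
def pvFindStepA (words : List String) (st : Nat × List (Nat × Nat)) (phrase : String) : Nat × List (Nat × Nat) :=
  let pws := PySem.Str.split₀ phrase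
  match pvFindLoopA words pws st.1 (words.length + 1 - pws.length) with
  | some i => (i + pws.length, st.2 ++ [(i, i + pws.length - 1)])
  | none => st

-- find_word_level_indexes(words, phrases)
def pvFindIdxsA (words phrases : List String) : List (Nat × Nat) :=
  (phrases.foldl (pvFindStepA words) (0, [])).2

-- the 'for idx, word in enumerate(words)' loop of A (state: final_tokens, current mask span, queue)
def pvEmitLoopA (cl cr : String) : List String → Nat → Nat → Nat → List (Nat × Nat) → List String → List String
  | [], _, _, _, _, acc => acc
  | w :: ws, idx, s, e, q, acc =>
    let acc1 := if idx = s then acc ++ [cl] else acc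
    let acc2 := acc1 ++ [w]
    if idx = e then
      match q with
      | (s', e') :: q' => pvEmitLoopA cl cr ws (idx + 1) s' e' q' (acc2 ++ [cr])
      | [] => pvEmitLoopA cl cr ws (idx + 1) s e [] (acc2 ++ [cr])
    else pvEmitLoopA cl cr ws (idx + 1) s e q acc2

-- remove_back_to_back_cr_cl (the index/skip_next loop, rendered as the equivalent pair recursion;
-- Python raises IndexError on [], which is unreachable from insert_sentinel_tokens)
def pvRBTB (cr cl : String) : List String → List String
  | a :: b :: rest => if a = cr ∧ b = cl then pvRBTB cr cl rest else a :: pvRBTB cr cl (b :: rest)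
  | rest => rest
termination_by l => l.length

def insert_sentinel_tokens (input_text : String) (masked_phrases : List String) (cl_token : String) (cr_token : String) : String :=
  let phrases := pvNormalize masked_phrases
  let words := PySem.Str.split₀ input_text
  let locs := pvFindIdxsA words phrases
  match locs with
  | [] => input_text
  | (s0, e0) :: q =>
    PySem.Str.join " " (pvRBTB cr_token cl_token (pvEmitLoopA cl_token cr_token words 0 s0 e0 q []))

-- ===== PORT B =====

-- inner while of B: elementwise comparison of the phrase words against words[i:], early exit
def pvPrefixAtB : List String → List String → Bool
  | _, [] => true
  | [], _ :: _ => false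
  | w :: ws, p :: ps => w == p && pvPrefixAtB ws ps

-- outer while of B: i runs from idx while i <= limit (limit = len(words) - n, a Python int)
def pvScanB (words pws : List String) (i : Nat) (limit : Int) : Option Nat :=
  if _h : (i : Int) ≤ limit then
    if pvPrefixAtB (words.drop i) pws then some i
    else pvScanB words pws (i + 1) limit
  else none
termination_by (limit + 1 - i).toNat
decreasing_by omega

-- one iteration of B's span-finding loop (half-open spans)
def pvSpanStepB (words : List String) (st : Nat × List (Nat × Nat)) (phrase : String) : Nat × List (Nat × Nat) :=
  let pws := PySem.Str.split₀ phrase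
  match pvScanB words pws st.1 ((words.length : Int) - (pws.length : Int)) with
  | some i => (i + pws.length, st.2 ++ [(i, i + pws.length)])
  | none => st

def pvSpansB (words phrases : List String) : List (Nat × Nat) :=
  (phrases.foldl (pvSpanStepB words) (0, [])).2

-- B's merge loop; merged[-1] is the head of the reversed accumulator (first case is unreachable: the
-- accumulator starts out nonempty and never shrinks)
def pvMergeLoopB : List (Nat × Nat) → List (Nat × Nat) → List (Nat × Nat)
  | [], (s, e) :: rest => pvMergeLoopB [(s, e)] rest
  | accRev, [] => accRev.reverse
  | (ls, le) :: accTl, (s, e) :: rest =>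
    if le = s then pvMergeLoopB ((ls, e) :: accTl) rest
    else pvMergeLoopB ((s, e) :: (ls, le) :: accTl) rest

def insert_sentinel_tokens_alt (input_text : String) (masked_phrases : List String) (cl_token : String) (cr_token : String) : String :=
  let phrases := pvNormalize masked_phrases
  let words := PySem.Str.split₀ input_text
  let spans := pvSpansB words phrases
  match spans with
  | [] => input_text
  | sp :: rest =>
    let merged := pvMergeLoopB [sp] rest
    -- emission loop: out.extend(words[prev:s]); out.append(cl); out.extend(words[s:e]); out.append(cr)
    -- (Python slices words[a:b] with Nat bounds are (words.drop a).take (b-a), PySem.List.slice_natCast)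
    let st := merged.foldl
      (fun (st : List String × Nat) se =>
        (st.1 ++ (words.drop st.2).take (se.1 - st.2) ++ [cl_token]
              ++ (words.drop se.1).take (se.2 - se.1) ++ [cr_token], se.2))
      ([], 0)
    PySem.Str.join " " (st.1 ++ words.drop st.2)

-- ===== PRECONDITION & SPEC =====

-- Pre_ excludes inputs where one of the sentinel tokens also occurs as a whitespace-separated word of
-- input_text: there A's value-based cleanup pass can delete genuine words of the text (an artefact of
-- its implementation); sentinels are special vocabulary tokens by design.
def Pre_insert_sentinel_tokens (input_text : String) (masked_phrases : List String) (cl_token : String) (cr_token : String) : Prop :=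
  ∀ w ∈ PySem.Str.split₀ input_text, w ≠ cl_token ∧ w ≠ cr_token
instance (input_text : String) (masked_phrases : List String) (cl_token : String) (cr_token : String) : Decidable (Pre_insert_sentinel_tokens input_text masked_phrases cl_token cr_token) := by unfold Pre_insert_sentinel_tokens; infer_instance

def pvWitness_insert_sentinel_tokens : String × List String × String × String :=
  ("the cat sat on the mat", ["cat sat", "on"], "<cl>", "<cr>")

def Spec_insert_sentinel_tokens (input_text : String) (masked_phrases : List String) (cl_token : String) (cr_token : String) (out : String) : Prop := out = insert_sentinel_tokens_alt input_text masked_phrases cl_token cr_token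
instance (input_text : String) (masked_phrases : List String) (cl_token : String) (cr_token : String) (out : String) : Decidable (Spec_insert_sentinel_tokens input_text masked_phrases cl_token cr_token out) := by unfold Spec_insert_sentinel_tokens; infer_instance

-- ===== CLAIM (what is proved, stated in full; the proofs are below) =====
def Claim_equal_insert_sentinel_tokens : Prop := ∀ (input_text : String) (masked_phrases : List String) (cl_token : String) (cr_token : String), Dom_insert_sentinel_tokens input_text masked_phrases cl_token cr_token → Pre_insert_sentinel_tokens input_text masked_phrases cl_token cr_token → Spec_insert_sentinel_tokens input_text masked_phrases cl_token cr_token (insert_sentinel_tokens input_text masked_phrases cl_token cr_token)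

-- ===== LEMMAS AND PROOFS =====

-- half-open view of A's inclusive (start, end) pairs
def pvHO (p : Nat × Nat) : Nat × Nat := (p.1, p.2 + 1)

-- the common specification of the emitted token list, over half-open spans
def pvE (words : List String) (cl cr : String) : Nat → List (Nat × Nat) → List String
  | prev, [] => words.drop prev
  | prev, (s, t) :: q =>
    (words.drop prev).take (s - prev) ++
      cl :: ((words.drop s).take (t - s) ++ cr :: pvE words cl cr t q)

-- structural merge of touching half-open spans
def pvMergeSpec : List (Nat × Nat) → List (Nat × Nat)
  | [] => []
  | [p] => [p]
  | (s, t) :: (s', t') :: q =>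
    if t = s' then pvMergeSpec ((s, t') :: q)
    else (s, t) :: pvMergeSpec ((s', t') :: q)
termination_by l => l.length

-- a chain of half-open spans: increasing, nonempty, within the first n words
def pvChain (n : Nat) : Nat → List (Nat × Nat) → Prop
  | _, [] => True
  | prev, (s, t) :: q => prev ≤ s ∧ s < t ∧ t ≤ n ∧ pvChain n t q

lemma pvPrefixAtB_iff (ws ps : List String) : pvPrefixAtB ws ps = true ↔ ps <+: ws := by
  induction ps generalizing ws with
  | nil => simp [pvPrefixAtB]
  | cons p ps ih =>
    cases ws with
    | nil => simp [pvPrefixAtB]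
    | cons w ws =>
      show (w == p && pvPrefixAtB ws ps) = true ↔ _
      rw [Bool.and_eq_true, beq_iff_eq, ih, List.cons_prefix_cons, eq_comm]

lemma pvScanB_eq (words pws : List String) (i : Nat) :
    pvFindLoopA words pws i (words.length + 1 - pws.length) =
      pvScanB words pws i ((words.length : Int) - (pws.length : Int)) := by
  rw [pvFindLoopA, pvScanB]
  by_cases hc : i < words.length + 1 - pws.length
  · rw [dif_pos hc, dif_pos (by omega)]
    by_cases hp : pws <+: words.drop i
    · rw [if_pos (List.prefix_iff_eq_take.mp hp).symm, if_pos (by rw [pvPrefixAtB_iff]; exact hp)]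
    · rw [if_neg (fun h => hp (List.prefix_iff_eq_take.mpr h.symm)),
          if_neg (by rw [pvPrefixAtB_iff]; exact hp)]
      exact pvScanB_eq words pws (i + 1)
  · rw [dif_neg hc, dif_neg (by omega)]
termination_by words.length + 1 - pws.length - i
decreasing_by omega

lemma pvScanB_some (words pws : List String) (i : Nat) (limit : Int) (j : Nat)
    (h : pvScanB words pws i limit = some j) :
    i ≤ j ∧ (j : Int) ≤ limit ∧ pws <+: words.drop j := by
  rw [pvScanB] at h
  by_cases hc : (i : Int) ≤ limit
  · rw [dif_pos hc] at h
    by_cases hp : pvPrefixAtB (words.drop i) pws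
    · rw [if_pos hp] at h
      obtain rfl : i = j := by simpa using h
      exact ⟨le_refl _, hc, (pvPrefixAtB_iff _ _).mp hp⟩
    · rw [if_neg (by simpa using hp)] at h
      obtain ⟨h1, h2, h3⟩ := pvScanB_some words pws (i + 1) limit j h
      exact ⟨by omega, h2, h3⟩
  · rw [dif_neg hc] at h; exact absurd h (by simp)
termination_by (limit + 1 - i).toNat
decreasing_by omega

lemma pvSpanStepB_none (words : List String) (st : Nat × List (Nat × Nat)) (phrase : String)
    (h : pvScanB words (PySem.Str.split₀ phrase) st.1
        ((words.length : Int) - ((PySem.Str.split₀ phrase).length : Int)) = none) :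
    pvSpanStepB words st phrase = st := by
  simp only [pvSpanStepB]; rw [h]

lemma pvSpanStepB_some (words : List String) (st : Nat × List (Nat × Nat)) (phrase : String) (i : Nat)
    (h : pvScanB words (PySem.Str.split₀ phrase) st.1
        ((words.length : Int) - ((PySem.Str.split₀ phrase).length : Int)) = some i) :
    pvSpanStepB words st phrase =
      (i + (PySem.Str.split₀ phrase).length, st.2 ++ [(i, i + (PySem.Str.split₀ phrase).length)]) := by
  simp only [pvSpanStepB]; rw [h]

lemma pvFindStepA_none (words : List String) (st : Nat × List (Nat × Nat)) (phrase : String)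
    (h : pvFindLoopA words (PySem.Str.split₀ phrase) st.1
        (words.length + 1 - (PySem.Str.split₀ phrase).length) = none) :
    pvFindStepA words st phrase = st := by
  simp only [pvFindStepA]; rw [h]

lemma pvFindStepA_some (words : List String) (st : Nat × List (Nat × Nat)) (phrase : String) (i : Nat)
    (h : pvFindLoopA words (PySem.Str.split₀ phrase) st.1
        (words.length + 1 - (PySem.Str.split₀ phrase).length) = some i) :
    pvFindStepA words st phrase =
      (i + (PySem.Str.split₀ phrase).length, st.2 ++ [(i, i + (PySem.Str.split₀ phrase).length - 1)]) := by
  simp only [pvFindStepA]; rw [h]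

lemma pvFoldB_tail (words : List String) (phrases : List String) (idx : Nat) (acc : List (Nat × Nat)) :
    phrases.foldl (pvSpanStepB words) (idx, acc) =
      ((phrases.foldl (pvSpanStepB words) (idx, [])).1,
        acc ++ (phrases.foldl (pvSpanStepB words) (idx, [])).2) := by
  induction phrases generalizing idx acc with
  | nil => simp
  | cons phrase rest ih =>
    simp only [List.foldl_cons]
    cases hscan : pvScanB words (PySem.Str.split₀ phrase) idx
        ((words.length : Int) - ((PySem.Str.split₀ phrase).length : Int)) with
    | none =>
      rw [pvSpanStepB_none words (idx, acc) phrase hscan, pvSpanStepB_none words (idx, []) phrase hscan]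
      exact ih idx acc
    | some i =>
      rw [pvSpanStepB_some words (idx, acc) phrase i hscan, pvSpanStepB_some words (idx, []) phrase i hscan]
      rw [ih (i + (PySem.Str.split₀ phrase).length) (acc ++ [(i, i + (PySem.Str.split₀ phrase).length)]),
          ih (i + (PySem.Str.split₀ phrase).length) ([] ++ [(i, i + (PySem.Str.split₀ phrase).length)])]
      simp

lemma pvFoldB_chain (words : List String) (phrases : List String) (idx : Nat)
    (hp : ∀ p ∈ phrases, PySem.Str.split₀ p ≠ []) :
    pvChain words.length idx (phrases.foldl (pvSpanStepB words) (idx, ([] : List (Nat × Nat)))).2 := by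
  induction phrases generalizing idx with
  | nil => simp [pvChain]
  | cons phrase rest ih =>
    simp only [List.foldl_cons]
    cases hscan : pvScanB words (PySem.Str.split₀ phrase) idx
        ((words.length : Int) - ((PySem.Str.split₀ phrase).length : Int)) with
    | none =>
      rw [pvSpanStepB_none words (idx, []) phrase hscan]
      exact ih idx (fun p hp' => hp p (by simp [hp']))
    | some i =>
      rw [pvSpanStepB_some words (idx, []) phrase i hscan]
      have hplen : 0 < (PySem.Str.split₀ phrase).length :=
        List.length_pos_iff.mpr (hp phrase (by simp))
      obtain ⟨h1, h2, h3⟩ := pvScanB_some words (PySem.Str.split₀ phrase) idx _ i hscan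
      rw [pvFoldB_tail]
      refine ⟨h1, by omega, by omega, ?_⟩
      exact ih (i + (PySem.Str.split₀ phrase).length) (fun p hp' => hp p (by simp [hp']))

lemma pvSpans_eq (words : List String) (phrases : List String)
    (hp : ∀ p ∈ phrases, PySem.Str.split₀ p ≠ []) (idx : Nat) (acc : List (Nat × Nat)) :
    phrases.foldl (pvSpanStepB words) (idx, acc.map pvHO) =
      ((phrases.foldl (pvFindStepA words) (idx, acc)).1,
        (phrases.foldl (pvFindStepA words) (idx, acc)).2.map pvHO) := by
  induction phrases generalizing idx acc with
  | nil => simp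
  | cons phrase rest ih =>
    simp only [List.foldl_cons]
    cases hscan : pvFindLoopA words (PySem.Str.split₀ phrase) idx
        (words.length + 1 - (PySem.Str.split₀ phrase).length) with
    | none =>
      rw [pvFindStepA_none words (idx, acc) phrase hscan,
          pvSpanStepB_none words (idx, acc.map pvHO) phrase (by rw [← pvScanB_eq]; exact hscan)]
      exact ih (fun p hp' => hp p (by simp [hp'])) idx acc
    | some i =>
      rw [pvFindStepA_some words (idx, acc) phrase i hscan,
          pvSpanStepB_some words (idx, acc.map pvHO) phrase i (by rw [← pvScanB_eq]; exact hscan)]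
      have hplen : 0 < (PySem.Str.split₀ phrase).length :=
        List.length_pos_iff.mpr (hp phrase (by simp))
      have hmap : (acc ++ [(i, i + (PySem.Str.split₀ phrase).length - 1)]).map pvHO =
          acc.map pvHO ++ [(i, i + (PySem.Str.split₀ phrase).length)] := by
        simp [pvHO]; omega
      rw [← hmap]
      exact ih (fun p hp' => hp p (by simp [hp'])) _ _

-- split₀ of a stripped, nonempty string is nonempty
lemma pvSplit₀_go_ne_nil (cs : List Char) (cur : List Char) (acc : List (List Char))
    (h : cur ≠ [] ∨ acc ≠ [] ∨ ∃ c ∈ cs, PySem.Chars.isspace c = false) :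
    PySem.Chars.split₀.go cs cur acc ≠ [] := by
  induction cs generalizing cur acc with
  | nil =>
    rw [PySem.Chars.split₀.go]
    split_ifs with hce
    · have hacc : acc ≠ [] := by
        rcases h with hcur | hacc | ⟨c, hc, _⟩
        · exact absurd (List.isEmpty_iff.mp hce) hcur
        · exact hacc
        · simp at hc
      simpa using hacc
    · simp
  | cons c rest ih =>
    rw [PySem.Chars.split₀.go]
    split_ifs with hsp hce
    · refine ih [] acc (Or.inr ?_)
      rcases h with hcur | hacc | ⟨c', hc', hc'sp⟩
      · exact absurd (List.isEmpty_iff.mp hce) hcur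
      · exact Or.inl hacc
      · rcases List.mem_cons.mp hc' with rfl | hmem
        · rw [hsp] at hc'sp; exact absurd hc'sp (by simp)
        · exact Or.inr ⟨c', hmem, hc'sp⟩
    · exact ih [] (cur.reverse :: acc) (Or.inr (Or.inl (by simp)))
    · exact ih (c :: cur) acc (Or.inl (by simp))

lemma pvStrip_split_ne (ts : List Char) (h : PySem.Chars.strip ts ≠ []) :
    PySem.Chars.split₀ (PySem.Chars.strip ts) ≠ [] := by
  have hpre : PySem.Chars.strip ts <+: PySem.Chars.lstrip ts := by
    have hsuf := List.dropWhile_suffix (p := PySem.Chars.isspace) (l := (PySem.Chars.lstrip ts).reverse)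
    have h2 := List.reverse_prefix.mpr hsuf
    rw [List.reverse_reverse] at h2
    exact h2
  obtain ⟨c, cs', hceq⟩ : ∃ c cs', PySem.Chars.strip ts = c :: cs' := by
    cases hx : PySem.Chars.strip ts with
    | nil => exact absurd hx h
    | cons c cs' => exact ⟨c, cs', rfl⟩
  rw [hceq] at hpre
  obtain ⟨t, ht⟩ := hpre
  have hdw : List.dropWhile PySem.Chars.isspace ts = c :: (cs' ++ t) := by
    have hy : PySem.Chars.lstrip ts = c :: (cs' ++ t) := by rw [← ht]; simp
    simpa [PySem.Chars.lstrip] using hy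
  have hne2 : List.dropWhile PySem.Chars.isspace ts ≠ [] := by rw [hdw]; simp
  have hc := List.head_dropWhile_not PySem.Chars.isspace hne2
  simp only [hdw, List.head_cons] at hc
  rw [hceq]
  unfold PySem.Chars.split₀
  exact pvSplit₀_go_ne_nil _ [] [] (Or.inr (Or.inr ⟨c, by simp, hc⟩))

lemma pvNormalize_split_ne_nil (masked_phrases : List String) :
    ∀ p ∈ pvNormalize masked_phrases, PySem.Str.split₀ p ≠ [] := by
  intro p hp
  unfold pvNormalize at hp
  rw [List.mem_filter] at hp
  obtain ⟨hmem, hne⟩ := hp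
  rw [List.mem_map] at hmem
  obtain ⟨q, _hq, rfl⟩ := hmem
  have hne' : PySem.Str.strip (PySem.Str.replace q "\uFFFD" "") ≠ "" := by simpa using hne
  have htl : (PySem.Str.strip (PySem.Str.replace q "\uFFFD" "")).toList =
      PySem.Chars.strip (PySem.Str.replace q "\uFFFD" "").toList := PySem.Str.toList_strip _
  have hstrip_ne : PySem.Chars.strip (PySem.Str.replace q "\uFFFD" "").toList ≠ [] := by
    intro hnil
    exact hne' (String.toList_eq_nil_iff.mp (htl.trans hnil))
  intro hnil
  apply pvStrip_split_ne _ hstrip_ne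
  have := congrArg (List.map String.toList) hnil
  simp only [PySem.Str.split₀] at hnil
  rw [htl] at hnil
  exact List.map_eq_nil_iff.mp hnil

-- ===== A's emit loop computes pvE =====
lemma pvE_nil (words : List String) (cl cr : String) (prev : Nat) :
    pvE words cl cr prev [] = words.drop prev := rfl

lemma pvE_cons (words : List String) (cl cr : String) (prev s t : Nat) (q : List (Nat × Nat)) :
    pvE words cl cr prev ((s, t) :: q) =
      (words.drop prev).take (s - prev) ++
        cl :: ((words.drop s).take (t - s) ++ cr :: pvE words cl cr t q) := rfl

lemma pvEmitLoopA_drain (cl cr : String) :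
    ∀ (ws : List String) (idx s e : Nat) (acc : List String),
      s ≤ e → e < idx →
      pvEmitLoopA cl cr ws idx s e [] acc = acc ++ ws := by
  intro ws
  induction ws with
  | nil => intro idx s e acc _ _; simp [pvEmitLoopA]
  | cons w ws ih =>
    intro idx s e acc hse hei
    have h1 : idx ≠ s := by omega
    have h2 : idx ≠ e := by omega
    simp only [pvEmitLoopA, if_neg h1, if_neg h2]
    rw [ih (idx + 1) s e (acc ++ [w]) hse (by omega)]
    simp

lemma pvEmitLoopA_spec (cl cr : String) (words : List String) :
    ∀ (idx s e : Nat) (q : List (Nat × Nat)) (acc : List String),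
      s ≤ e → e < words.length → pvChain words.length (e + 1) (q.map pvHO) →
      ((idx ≤ s →
          pvEmitLoopA cl cr (words.drop idx) idx s e q acc =
            acc ++ pvE words cl cr idx (((s, e) :: q).map pvHO)) ∧
       (s < idx → idx ≤ e →
          pvEmitLoopA cl cr (words.drop idx) idx s e q acc =
            acc ++ ((words.drop idx).take (e + 1 - idx) ++ cr :: pvE words cl cr (e + 1) (q.map pvHO)))) := by
  suffices main : ∀ (ws : List String) (idx s e : Nat) (q : List (Nat × Nat)) (acc : List String),
      ws = words.drop idx → s ≤ e → e < words.length → pvChain words.length (e + 1) (q.map pvHO) →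
      ((idx ≤ s →
          pvEmitLoopA cl cr ws idx s e q acc =
            acc ++ pvE words cl cr idx (((s, e) :: q).map pvHO)) ∧
       (s < idx → idx ≤ e →
          pvEmitLoopA cl cr ws idx s e q acc =
            acc ++ ((words.drop idx).take (e + 1 - idx) ++ cr :: pvE words cl cr (e + 1) (q.map pvHO)))) by
    intro idx s e q acc hse hen hch
    exact main (words.drop idx) idx s e q acc rfl hse hen hch
  intro ws
  induction ws with
  | nil =>
    intro idx s e q acc hdrop hse hen hch
    have hlen : words.length ≤ idx := List.drop_eq_nil_iff.mp hdrop.symm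
    exact ⟨fun hle => absurd hle (by omega), fun hs hie => absurd hie (by omega)⟩
  | cons w ws ih =>
    intro idx s e q acc hdrop hse hen hch
    have hidx : idx < words.length := by
      by_contra hc
      rw [List.drop_eq_nil_of_le (by omega)] at hdrop
      cases hdrop
    have hws : ws = words.drop (idx + 1) := by
      have := congrArg List.tail hdrop
      simpa [List.tail_drop] using this
    have hweq : words.drop idx = w :: words.drop (idx + 1) := by
      rw [← hws, ← hdrop]
    constructor
    · -- before / at the start of the current span
      intro hles
      rcases Nat.lt_or_ge idx s with hlt | hge
      · -- strictly before the span
        have h1 : idx ≠ s := by omega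
        have h2 : idx ≠ e := by omega
        simp only [pvEmitLoopA, if_neg h1, if_neg h2]
        rw [(ih (idx + 1) s e q (acc ++ [w]) hws hse hen hch).1 (by omega)]
        simp only [List.map_cons, pvE_cons, pvHO]
        have htake : (words.drop idx).take (s - idx) =
            w :: (words.drop (idx + 1)).take (s - (idx + 1)) := by
          rw [hweq]
          cases hk : s - idx with
          | zero => omega
          | succ k =>
            have hke : k = s - (idx + 1) := by omega
            rw [List.take_succ_cons, hke]
        rw [htake]
        simp
      · -- idx = s : emit cl, then the word
        have hseq : idx = s := by omega
        subst hseq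
        simp only [pvEmitLoopA]
        by_cases h2 : idx = e
        · -- single-word span ends here: emit cr and pop the queue
          subst h2
          have htake1 : List.take 1 (List.drop idx words) = [w] := by
            rw [hweq]; simp
          cases q with
          | nil =>
            simp only [if_true]
            rw [pvEmitLoopA_drain cl cr ws (idx + 1) idx idx
                  (acc ++ [cl] ++ [w] ++ [cr]) (le_refl _) (by omega), hws]
            simp [pvE_cons, pvE_nil, pvHO, htake1]
          | cons p q' =>
            obtain ⟨s2, e2⟩ := p
            obtain ⟨h4, h5, h6, h7⟩ := hch
            simp only [if_true]
            rw [(ih (idx + 1) s2 e2 q' (acc ++ [cl] ++ [w] ++ [cr]) hws (by omega) (by omega) h7).1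
                  (by omega)]
            simp [pvE_cons, pvE_nil, pvHO, htake1]
        · -- span continues past this word
          rw [if_neg h2]
          simp only [if_true]
          rw [(ih (idx + 1) idx e q ((acc ++ [cl]) ++ [w]) hws (by omega) hen hch).2
                (by omega) (by omega)]
          have htk : (words.drop idx).take (e + 1 - idx) =
              w :: (words.drop (idx + 1)).take (e + 1 - (idx + 1)) := by
            rw [hweq]
            cases hk : e + 1 - idx with
            | zero => omega
            | succ k =>
              have hke : k = e + 1 - (idx + 1) := by omega
              rw [List.take_succ_cons, hke]
          simp [pvE_cons, pvE_nil, pvHO, htk]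
    · -- inside the current span (s < idx ≤ e)
      intro hs hie
      have h1 : idx ≠ s := by omega
      simp only [pvEmitLoopA, if_neg h1]
      by_cases h2 : idx = e
      · subst h2
        have htake1 : List.take 1 (List.drop idx words) = [w] := by
          rw [hweq]; simp
        simp only [if_true]
        cases q with
        | nil =>
          rw [pvEmitLoopA_drain cl cr ws (idx + 1) s idx
                (acc ++ [w] ++ [cr]) (by omega) (by omega), hws]
          simp [pvE_nil, htake1]
        | cons p q' =>
          obtain ⟨s2, e2⟩ := p
          obtain ⟨h4, h5, h6, h7⟩ := hch
          show pvEmitLoopA cl cr ws (idx + 1) s2 e2 q' (acc ++ [w] ++ [cr]) = _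
          rw [(ih (idx + 1) s2 e2 q' (acc ++ [w] ++ [cr]) hws (by omega) (by omega) h7).1
                (by omega)]
          simp [pvE_cons, pvE_nil, pvHO, htake1]
      · rw [if_neg h2]
        rw [(ih (idx + 1) s e q (acc ++ [w]) hws (by omega) hen hch).2 (by omega) (by omega)]
        have htk : (words.drop idx).take (e + 1 - idx) =
            w :: (words.drop (idx + 1)).take (e + 1 - (idx + 1)) := by
          rw [hweq]
          cases hk : e + 1 - idx with
          | zero => omega
          | succ k =>
            have hke : k = e + 1 - (idx + 1) := by omega
            rw [List.take_succ_cons, hke]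
        simp [htk]

-- ===== rbtb on pvE = pvE on merged spans =====
lemma pvRBTB_nil (cr cl : String) : pvRBTB cr cl [] = [] := by rw [pvRBTB] <;> simp

lemma pvRBTB_single (cr cl a : String) : pvRBTB cr cl [a] = [a] := by rw [pvRBTB] <;> simp

lemma pvRBTB_pair (cr cl : String) (ys : List String) :
    pvRBTB cr cl (cr :: cl :: ys) = pvRBTB cr cl ys := by
  rw [pvRBTB]; simp

lemma pvRBTB_cons (cr cl : String) (a b : String) (ys : List String) (h : ¬(a = cr ∧ b = cl)) :
    pvRBTB cr cl (a :: b :: ys) = a :: pvRBTB cr cl (b :: ys) := by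
  rw [pvRBTB]; rw [if_neg h]

lemma pvRBTB_append (cr cl : String) (xs ys : List String) (h : ∀ x ∈ xs, x ≠ cr) :
    pvRBTB cr cl (xs ++ ys) = xs ++ pvRBTB cr cl ys := by
  induction xs with
  | nil => simp
  | cons x xs ih =>
    have hx : x ≠ cr := h x (by simp)
    cases hxy : xs ++ ys with
    | nil =>
      obtain ⟨rfl, rfl⟩ := List.append_eq_nil_iff.mp hxy
      simp [pvRBTB_single, pvRBTB_nil]
    | cons b rest =>
      rw [List.cons_append, hxy, pvRBTB_cons cr cl x b rest (fun hc => hx hc.1), ← hxy,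
          ih (fun y hy => h y (by simp [hy]))]
      simp

lemma pvRBTB_fresh (cr cl : String) (xs : List String) (h : ∀ x ∈ xs, x ≠ cr) :
    pvRBTB cr cl xs = xs := by
  have := pvRBTB_append cr cl xs [] h
  simpa [pvRBTB_nil] using this

lemma pvRBTB_peel (cr cl : String) (seg mid rest : List String)
    (h1 : ∀ x ∈ seg, x ≠ cr) (h2 : ∀ x ∈ mid, x ≠ cr ∧ x ≠ cl) (hm : mid ≠ []) :
    pvRBTB cr cl (seg ++ cl :: (mid ++ cr :: rest)) =
      seg ++ cl :: (mid ++ pvRBTB cr cl (cr :: rest)) := by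
  rw [pvRBTB_append cr cl seg _ h1]
  cases mid with
  | nil => exact absurd rfl hm
  | cons m mid' =>
    rw [show cl :: (m :: mid' ++ cr :: rest) = cl :: m :: (mid' ++ cr :: rest) by simp,
        pvRBTB_cons cr cl cl m _ (fun hc => (h2 m (by simp)).2 hc.2),
        show m :: (mid' ++ cr :: rest) = (m :: mid') ++ cr :: rest by simp,
        pvRBTB_append cr cl (m :: mid') _ (fun y hy => (h2 y hy).1)]

lemma pvRBTB_cr_drop (words : List String) (cl cr : String)
    (hw : ∀ w ∈ words, w ≠ cl ∧ w ≠ cr) (t : Nat) :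
    pvRBTB cr cl (cr :: words.drop t) = cr :: words.drop t := by
  cases hdt : words.drop t with
  | nil => exact pvRBTB_single cr cl cr
  | cons w rest =>
    have hwmem : w ∈ words := List.mem_of_mem_drop (by rw [hdt]; simp)
    rw [pvRBTB_cons cr cl cr w rest (fun hc => (hw w hwmem).1 hc.2), ← hdt,
        pvRBTB_fresh cr cl _ (fun y hy => (hw y (List.mem_of_mem_drop hy)).2)]

lemma pvTake_ne_cr (words : List String) (cl cr : String)
    (hw : ∀ w ∈ words, w ≠ cl ∧ w ≠ cr) (a b : Nat) :
    ∀ x ∈ (words.drop a).take b, x ≠ cr :=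
  fun x hx => (hw x (List.mem_of_mem_drop (List.mem_of_mem_take hx))).2

lemma pvTake_fresh (words : List String) (cl cr : String)
    (hw : ∀ w ∈ words, w ≠ cl ∧ w ≠ cr) (a b : Nat) :
    ∀ x ∈ (words.drop a).take b, x ≠ cr ∧ x ≠ cl :=
  fun x hx =>
    ⟨(hw x (List.mem_of_mem_drop (List.mem_of_mem_take hx))).2,
     (hw x (List.mem_of_mem_drop (List.mem_of_mem_take hx))).1⟩

lemma pvTake_ne_nil (words : List String) (a b : Nat) (h1 : a < words.length) (h2 : 0 < b) :
    (words.drop a).take b ≠ [] := by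
  have : ((words.drop a).take b).length = min b (words.length - a) := by
    simp [List.length_take, List.length_drop]
  intro hnil
  rw [hnil] at this
  simp at this
  omega

lemma pvRBTB_E (words : List String) (cl cr : String)
    (hw : ∀ w ∈ words, w ≠ cl ∧ w ≠ cr) :
    ∀ (spans : List (Nat × Nat)) (prev : Nat), pvChain words.length prev spans →
      pvRBTB cr cl (pvE words cl cr prev spans) = pvE words cl cr prev (pvMergeSpec spans) := by
  intro spans
  induction spans using pvMergeSpec.induct with
  | case1 =>
    intro prev _
    rw [pvMergeSpec]
    show pvRBTB cr cl (words.drop prev) = words.drop prev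
    exact pvRBTB_fresh cr cl _ (fun y hy => (hw y (List.mem_of_mem_drop hy)).2)
  | case2 p =>
    obtain ⟨s, t⟩ := p
    intro prev hch
    obtain ⟨h1, h2, h3, -⟩ := hch
    rw [pvMergeSpec]
    show pvRBTB cr cl ((words.drop prev).take (s - prev) ++
        cl :: ((words.drop s).take (t - s) ++ cr :: words.drop t)) = _
    rw [pvRBTB_peel cr cl _ _ _ (pvTake_ne_cr words cl cr hw prev (s - prev))
        (pvTake_fresh words cl cr hw s (t - s))
        (pvTake_ne_nil words s (t - s) (by omega) (by omega)),
        pvRBTB_cr_drop words cl cr hw t]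
    rfl
  | case3 s t t' q ih =>
    intro prev hch
    obtain ⟨h1, h2, h3, h4, h5, h6, h7⟩ := hch
    have hch' : pvChain words.length prev ((s, t') :: q) := ⟨h1, by omega, h6, h7⟩
    have hdd : (words.drop s).drop (t - s) = words.drop t := by
      rw [List.drop_drop]; congr 1; omega
    have hmid2 : t' - s = (t - s) + (t' - t) := by omega
    have hsplit : (words.drop s).take (t' - s) =
        (words.drop s).take (t - s) ++ (words.drop t).take (t' - t) := by
      rw [hmid2, List.take_add, hdd]
    have hlhs : pvRBTB cr cl (pvE words cl cr prev ((s, t) :: (t, t') :: q)) =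
        (words.drop prev).take (s - prev) ++
          cl :: ((words.drop s).take (t - s) ++ ((words.drop t).take (t' - t) ++
            pvRBTB cr cl (cr :: pvE words cl cr t' q))) := by
      show pvRBTB cr cl ((words.drop prev).take (s - prev) ++
          cl :: ((words.drop s).take (t - s) ++ cr :: pvE words cl cr t ((t, t') :: q))) = _
      have hE : pvE words cl cr t ((t, t') :: q) =
          cl :: ((words.drop t).take (t' - t) ++ cr :: pvE words cl cr t' q) := by
        show (words.drop t).take (t - t) ++ _ = _
        simp
      rw [hE, pvRBTB_peel cr cl _ _ _ (pvTake_ne_cr words cl cr hw prev (s - prev))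
            (pvTake_fresh words cl cr hw s (t - s))
            (pvTake_ne_nil words s (t - s) (by omega) (by omega)),
          pvRBTB_pair,
          pvRBTB_append cr cl _ _ (pvTake_ne_cr words cl cr hw t (t' - t))]
    have hrhs : pvRBTB cr cl (pvE words cl cr prev ((s, t') :: q)) =
        (words.drop prev).take (s - prev) ++
          cl :: ((words.drop s).take (t - s) ++ ((words.drop t).take (t' - t) ++
            pvRBTB cr cl (cr :: pvE words cl cr t' q))) := by
      show pvRBTB cr cl ((words.drop prev).take (s - prev) ++
          cl :: ((words.drop s).take (t' - s) ++ cr :: pvE words cl cr t' q)) = _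
      rw [pvRBTB_peel cr cl _ _ _ (pvTake_ne_cr words cl cr hw prev (s - prev))
            (pvTake_fresh words cl cr hw s (t' - s))
            (pvTake_ne_nil words s (t' - s) (by omega) (by omega)),
          hsplit]
      simp
    rw [pvMergeSpec, if_pos rfl, ← ih prev hch', hrhs, hlhs]
  
  | case4 s t s' t' q hcond ih =>
    intro prev hch
    obtain ⟨h1, h2, h3, h4, h5, h6, h7⟩ := hch
    have hts' : t < s' := by omega
    have hch' : pvChain words.length t ((s', t') :: q) := ⟨by omega, h5, h6, h7⟩
    have hX : ∃ w X', pvE words cl cr t ((s', t') :: q) = w :: X' ∧ w ∈ words := by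
      have hseg2 : (words.drop t).take (s' - t) ≠ [] :=
        pvTake_ne_nil words t (s' - t) (by omega) (by omega)
      cases hs2 : (words.drop t).take (s' - t) with
      | nil => exact absurd hs2 hseg2
      | cons w s2' =>
        refine ⟨w, s2' ++ cl :: ((words.drop s').take (t' - s') ++ cr :: pvE words cl cr t' q), ?_, ?_⟩
        · show (words.drop t).take (s' - t) ++ _ = _
          rw [hs2]; simp
        · exact List.mem_of_mem_drop (List.mem_of_mem_take (by rw [hs2]; simp))
    obtain ⟨w, X', hXeq, hwmem⟩ := hX
    have hlhs : pvRBTB cr cl (pvE words cl cr prev ((s, t) :: (s', t') :: q)) =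
        (words.drop prev).take (s - prev) ++
          cl :: ((words.drop s).take (t - s) ++ cr :: pvE words cl cr t (pvMergeSpec ((s', t') :: q))) := by
      show pvRBTB cr cl ((words.drop prev).take (s - prev) ++
          cl :: ((words.drop s).take (t - s) ++ cr :: pvE words cl cr t ((s', t') :: q))) = _
      rw [pvRBTB_peel cr cl _ _ _ (pvTake_ne_cr words cl cr hw prev (s - prev))
            (pvTake_fresh words cl cr hw s (t - s))
            (pvTake_ne_nil words s (t - s) (by omega) (by omega)),
          hXeq, pvRBTB_cons cr cl cr w X' (fun hc => (hw w hwmem).1 hc.2), ← hXeq,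
          ih t hch']
    rw [hlhs, pvMergeSpec, if_neg hcond]
    rfl

-- ===== B's merge loop and emission loop =====
lemma pvMergeLoopB_spec (spans : List (Nat × Nat)) :
    ∀ (accTl : List (Nat × Nat)) (ls le : Nat),
      pvMergeLoopB ((ls, le) :: accTl) spans =
        accTl.reverse ++ pvMergeSpec ((ls, le) :: spans) := by
  induction spans with
  | nil =>
    intro accTl ls le
    rw [pvMergeLoopB, pvMergeSpec]
    simp
  | cons p rest ih =>
    intro accTl ls le
    obtain ⟨s, e⟩ := p
    rw [pvMergeLoopB]
    by_cases hc : le = s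
    · rw [if_pos hc, ih, pvMergeSpec, if_pos hc]
    · rw [if_neg hc, ih, pvMergeSpec, if_neg hc]
      simp

lemma pvEmitB_spec (words : List String) (cl cr : String) :
    ∀ (ms : List (Nat × Nat)) (acc : List String) (prev : Nat),
      (ms.foldl
        (fun (st : List String × Nat) se =>
          (st.1 ++ (words.drop st.2).take (se.1 - st.2) ++ [cl]
                ++ (words.drop se.1).take (se.2 - se.1) ++ [cr], se.2)) (acc, prev)).1 ++
        words.drop (ms.foldl
          (fun (st : List String × Nat) se =>
            (st.1 ++ (words.drop st.2).take (se.1 - st.2) ++ [cl]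
                  ++ (words.drop se.1).take (se.2 - se.1) ++ [cr], se.2)) (acc, prev)).2 =
      acc ++ pvE words cl cr prev ms := by
  intro ms
  induction ms with
  | nil => intro acc prev; simp [pvE_nil]
  | cons p ms ih =>
    intro acc prev
    obtain ⟨s, t⟩ := p
    simp only [List.foldl_cons]
    rw [ih]
    simp [pvE_cons]

-- ===== VERDICT (by name: the statement is the Claim_ definition above) =====
theorem insert_sentinel_tokens_spec : Claim_equal_insert_sentinel_tokens := by
  intro input_text mp cl cr _hdom hpre
  unfold Spec_insert_sentinel_tokens
  simp only [insert_sentinel_tokens, insert_sentinel_tokens_alt]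
  have hp := pvNormalize_split_ne_nil mp
  have hw : ∀ w ∈ PySem.Str.split₀ input_text, w ≠ cl ∧ w ≠ cr := fun w hwm => hpre w hwm
  have hspans : pvSpansB (PySem.Str.split₀ input_text) (pvNormalize mp) =
      (pvFindIdxsA (PySem.Str.split₀ input_text) (pvNormalize mp)).map pvHO := by
    unfold pvSpansB pvFindIdxsA
    have h := pvSpans_eq (PySem.Str.split₀ input_text) (pvNormalize mp) hp 0 []
    simp only [List.map_nil] at h
    rw [h]
  have hchain : pvChain (PySem.Str.split₀ input_text).length 0
      (pvSpansB (PySem.Str.split₀ input_text) (pvNormalize mp)) :=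
    pvFoldB_chain (PySem.Str.split₀ input_text) (pvNormalize mp) 0 hp
  split
  · -- A found no phrase: B finds none either
    rename_i heq
    rw [heq] at hspans
    simp only [List.map_nil] at hspans
    split
    · rfl
    · rename_i sp rest hsp
      rw [hspans] at hsp
      cases hsp
  · rename_i s0 e0 q heq
    rw [heq] at hspans
    simp only [List.map_cons, pvHO] at hspans
    rw [hspans] at hchain
    obtain ⟨hc1, hc2, hc3, hc4⟩ := hchain
    split
    · rename_i hnil
      rw [hspans] at hnil
      cases hnil
    · rename_i sp rest hsp
      rw [hspans] at hsp
      injection hsp with hsp1 hsp2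
      subst hsp1
      subst hsp2
      -- A's token stream is pvE over the found spans
      have hAemit := (pvEmitLoopA_spec cl cr (PySem.Str.split₀ input_text) 0 s0 e0 q []
          (by omega) (by omega) hc4).1 (by omega)
      rw [List.drop_zero] at hAemit
      rw [hAemit]
      simp only [List.nil_append, List.map_cons, pvHO]
      -- rbtb merges the touching spans
      have hrb := pvRBTB_E (PySem.Str.split₀ input_text) cl cr hw
          (((s0, e0) :: q).map pvHO) 0 (by exact ⟨hc1, hc2, hc3, hc4⟩)
      simp only [List.map_cons, pvHO] at hrb
      rw [hrb]
      -- B's merge loop and emission loop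
      rw [pvMergeLoopB_spec (q.map pvHO) [] s0 (e0 + 1)]
      simp only [List.reverse_nil, List.nil_append]
      rw [pvEmitB_spec (PySem.Str.split₀ input_text) cl cr
          (pvMergeSpec ((s0, e0 + 1) :: q.map pvHO)) [] 0]
      simp
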